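-- pv_equiv track=rewrite | github.com/sayemomer/better-call-lincon | app/utils/document_recommendations.py | detect_permit_type_from_documents
-- ===== SOURCE A (Python) =====
-- from typing import List, Dict, Any, Optional
--
-- def detect_permit_type_from_documents(document_types: List[str]) -> Optional[str]:
--     """
--     Detect permit type from uploaded document types.
--
--     Args:
--         document_types: List of document type strings
--
--     Returns:
--         "study", "work", or None
--     """
--     if not document_types:
--         return None
--
--     document_types_lower = [dt.lower() for dt in document_types]
--
--     if any("study" in dt for dt in document_types_lower):
--         return "study"
--     elif any("work" in dt for dt in document_types_lower):
--         return "work"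
--
--     return None
-- ===== SOURCE B (Python) =====
-- def detect_permit_type_from_documents(document_types):
--     saw_work = False
--     for dt in document_types:
--         low = dt.lower()
--         if "study" in low:
--             return "study"
--         if "work" in low:
--             saw_work = True
--     return "work" if saw_work else None
-- ===== Notes on version B (the rewrite author's own statement) =====
-- stated objective: simpler
-- what changed: Replaces the lowered-copy list plus two separate any() scans and the explicit empty-list guard with one pass that returns 'study' immediately and remembers whether 'work' was seen.
import Mathlib
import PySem

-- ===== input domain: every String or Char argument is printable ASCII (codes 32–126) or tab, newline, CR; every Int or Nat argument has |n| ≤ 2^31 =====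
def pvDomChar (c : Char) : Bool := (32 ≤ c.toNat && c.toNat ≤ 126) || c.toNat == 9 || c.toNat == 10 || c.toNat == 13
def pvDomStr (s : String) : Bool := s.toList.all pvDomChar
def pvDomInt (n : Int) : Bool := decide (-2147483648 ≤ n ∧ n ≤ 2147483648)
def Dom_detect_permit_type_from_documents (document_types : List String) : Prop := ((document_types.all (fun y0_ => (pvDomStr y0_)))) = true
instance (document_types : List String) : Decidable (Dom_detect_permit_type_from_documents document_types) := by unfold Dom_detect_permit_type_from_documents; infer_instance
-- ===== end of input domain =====

-- B replaces the lowered list + two any() scans with one early-returning pass keeping a saw_work flag (simpler, same cost).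


-- ===== PORT A =====
def detect_permit_type_from_documents (document_types : List String) : Option String :=
  if document_types = [] then none
  else
    let document_types_lower := document_types.map PySem.Str.lower
    if document_types_lower.any (fun dt => PySem.Str.isIn "study" dt) then some "study"
    else if document_types_lower.any (fun dt => PySem.Str.isIn "work" dt) then some "work"
    else none

-- ===== PORT B =====
def pvGoB : List String → Bool → Option String
  | [], saw_work => if saw_work then some "work" else none
  | dt :: rest, saw_work =>
    let low := PySem.Str.lower dt
    if PySem.Str.isIn "study" low then some "study"
    else pvGoB rest (saw_work || PySem.Str.isIn "work" low)

def detect_permit_type_from_documents_alt (document_types : List String) : Option String :=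
  pvGoB document_types false

-- ===== PRECONDITION & SPEC =====
def Spec_detect_permit_type_from_documents (document_types : List String) (out : Option String) : Prop := out = detect_permit_type_from_documents_alt document_types
instance (document_types : List String) (out : Option String) : Decidable (Spec_detect_permit_type_from_documents document_types out) := by unfold Spec_detect_permit_type_from_documents; infer_instance

-- ===== CLAIM (what is proved, stated in full; the proofs are below) =====
def Claim_equal_detect_permit_type_from_documents : Prop := ∀ (document_types : List String), Dom_detect_permit_type_from_documents document_types → Spec_detect_permit_type_from_documents document_types (detect_permit_type_from_documents document_types)

-- ===== LEMMAS AND PROOFS =====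
theorem pvGoB_char (xs : List String) (sw : Bool) :
    pvGoB xs sw =
      if xs.any (fun dt => PySem.Str.isIn "study" (PySem.Str.lower dt)) then some "study"
      else if sw || xs.any (fun dt => PySem.Str.isIn "work" (PySem.Str.lower dt)) then some "work"
      else none := by
  induction xs generalizing sw with
  | nil => simp [pvGoB]
  | cons d rest ih =>
      simp only [pvGoB, List.any_cons]
      by_cases hs : PySem.Chars.isIn ['s','t','u','d','y'] (PySem.Chars.lower d.toList) = true
      · simp [hs]
      · simp only [Bool.not_eq_true] at hs
        simp [hs, ih, Bool.or_assoc]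

-- ===== VERDICT (by name: the statement is the Claim_ definition above) =====
theorem detect_permit_type_from_documents_spec : Claim_equal_detect_permit_type_from_documents := by
  intro xs _
  unfold Spec_detect_permit_type_from_documents detect_permit_type_from_documents detect_permit_type_from_documents_alt
  rw [pvGoB_char]
  cases xs with
  | nil => simp
  | cons d rest => simp [List.any_map]
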